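-- pv_equiv track=rewrite | github.com/amol179/DSA_Notes_Dump | Code_Force/1000/Move Brackets/Move Brackets.py | minimum_moves_to_rbs
-- ===== SOURCE A (Python) =====
-- def minimum_moves_to_rbs(t, test_cases):
--     results = []
--
--     for case in test_cases:
--         n, s = case
--         balance = 0
--         min_moves = 0
--
--         for char in s:
--             if char == "(":
--                 balance += 1
--             else:  # char == ')'
--                 balance -= 1
--
--             if balance < 0:
--                 min_moves += 1
--                 balance = 0
--
--         results.append(min_moves)
--
--     return results
-- ===== SOURCE B (Python) =====
-- def _moves(s):
--     # staged: build the full prefix-sum list, then take min() of it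
--     bal = 0
--     prefixes = [0]
--     for ch in s:
--         bal = bal + 1 if ch == "(" else bal - 1
--         prefixes.append(bal)
--     return -min(prefixes)
--
--
-- def minimum_moves_to_rbs(t, test_cases):
--     return [_moves(s) for n, s in test_cases]
-- ===== Notes on version B (the rewrite author's own statement) =====
-- stated objective: alternative
-- what changed: B replaces A's single clip-and-count accumulator loop with a staged computation: a helper builds the whole un-reset prefix-sum list, then the answer is the closed form -min(prefixes); the outer loop becomes a comprehension over a helper.
import Mathlib
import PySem

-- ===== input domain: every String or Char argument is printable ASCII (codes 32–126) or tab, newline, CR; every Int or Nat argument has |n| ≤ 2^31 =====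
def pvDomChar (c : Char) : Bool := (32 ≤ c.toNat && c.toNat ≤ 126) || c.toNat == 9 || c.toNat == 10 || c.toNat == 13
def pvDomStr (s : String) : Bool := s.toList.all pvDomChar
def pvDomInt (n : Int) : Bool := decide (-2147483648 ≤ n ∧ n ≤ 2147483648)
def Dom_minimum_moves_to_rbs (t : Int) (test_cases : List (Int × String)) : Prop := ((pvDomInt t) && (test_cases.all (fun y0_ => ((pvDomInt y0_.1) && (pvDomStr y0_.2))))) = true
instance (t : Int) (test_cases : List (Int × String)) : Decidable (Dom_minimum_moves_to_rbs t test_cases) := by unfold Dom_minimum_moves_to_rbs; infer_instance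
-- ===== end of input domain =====

-- B replaces A's clip-and-count accumulator loop by a staged computation (build the full
-- prefix-sum list, then -min of it); same cost, different decomposition (objective: alternative).

-- ===== PORT A =====
-- state = (balance, min_moves), as in A's inner loop
def pvAStep (st : Int × Int) (c : Char) : Int × Int :=
  let b := if c = '(' then st.1 + 1 else st.1 - 1
  if b < 0 then (0, st.2 + 1) else (b, st.2)

def minimum_moves_to_rbs (t : Int) (test_cases : List (Int × String)) : List Int :=
  test_cases.foldl (fun results case =>
    let s := case.2
    let st := s.toList.foldl pvAStep (0, 0)
    results ++ [st.2]) []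

-- ===== PORT B =====
-- helper _moves: build the list of running prefix sums, then return -min(prefixes)
def pvMoves (s : String) : Int :=
  let st := s.toList.foldl (fun (st : Int × List Int) ch =>
    let b := if ch = '(' then st.1 + 1 else st.1 - 1
    (b, st.2 ++ [b])) (0, ([0] : List Int))
  (-((PySem.List.min? st.2 (fun y => y)).getD 0))  -- list starts as [0], so min? is never none

def minimum_moves_to_rbs_alt (t : Int) (test_cases : List (Int × String)) : List Int :=
  test_cases.map (fun case => pvMoves case.2)

-- ===== PRECONDITION & SPEC =====
def Spec_minimum_moves_to_rbs (t : Int) (test_cases : List (Int × String)) (out : List Int) : Prop := out = minimum_moves_to_rbs_alt t test_cases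
instance (t : Int) (test_cases : List (Int × String)) (out : List Int) : Decidable (Spec_minimum_moves_to_rbs t test_cases out) := by unfold Spec_minimum_moves_to_rbs; infer_instance

-- ===== CLAIM (what is proved, stated in full; the proofs are below) =====
def Claim_equal_minimum_moves_to_rbs : Prop := ∀ (t : Int) (test_cases : List (Int × String)), Dom_minimum_moves_to_rbs t test_cases → Spec_minimum_moves_to_rbs t test_cases (minimum_moves_to_rbs t test_cases)

-- ===== LEMMAS AND PROOFS =====

-- Proof-side abstraction of B's loop, tracking only (balance, running minimum).
def pvBStep (st : Int × Int) (c : Char) : Int × Int :=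
  let b := if c = '(' then st.1 + 1 else st.1 - 1
  (b, min st.2 b)

-- The list of running balances starting from b.
def pvPrefs (b : Int) : List Char → List Int
  | [] => []
  | c :: cs =>
    let b' := if c = '(' then b + 1 else b - 1
    b' :: pvPrefs b' cs

-- The first component of the pvBStep fold ignores the second component of the seed.
theorem pvB_fst (l : List Char) : ∀ (b m m' : Int),
    (l.foldl pvBStep (b, m)).1 = (l.foldl pvBStep (b, m')).1 := by
  induction l with
  | nil => intro b m m'; rfl
  | cons c cs ih => intro b m m'; simp only [List.foldl_cons, pvBStep]; exact ih _ _ _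

-- B's port's loop builds exactly ps ++ pvPrefs b l (and the final balance).
theorem pvB_build (l : List Char) : ∀ (b : Int) (ps : List Int),
    l.foldl (fun (st : Int × List Int) ch =>
      let b := if ch = '(' then st.1 + 1 else st.1 - 1
      (b, st.2 ++ [b])) (b, ps) = ((l.foldl pvBStep (b, 0)).1, ps ++ pvPrefs b l) := by
  induction l with
  | nil => intro b ps; simp [pvPrefs]
  | cons c cs ih =>
    intro b ps
    simp only [List.foldl_cons, pvPrefs, pvBStep]
    rw [ih]
    rw [pvB_fst cs _ 0 (min 0 (if c = '(' then b + 1 else b - 1))]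
    simp

-- Folding min over the prefix list equals the running minimum tracked by pvBStep.
theorem pvPrefs_min (l : List Char) : ∀ (b m : Int),
    (pvPrefs b l).foldl min m = (l.foldl pvBStep (b, m)).2 := by
  induction l with
  | nil => intro b m; rfl
  | cons c cs ih =>
    intro b m
    simp only [pvPrefs, List.foldl_cons, pvBStep]
    exact ih _ _

-- Invariant linking A's state (balance, count) to (bal − min, −min) of B's abstract state.
theorem pv_loop_link (l : List Char) : ∀ (b mb : Int), mb ≤ 0 → mb ≤ b →
    l.foldl pvAStep (b - mb, -mb)
      = ((l.foldl pvBStep (b, mb)).1 - (l.foldl pvBStep (b, mb)).2,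
         -(l.foldl pvBStep (b, mb)).2) := by
  induction l with
  | nil => intro b mb h0 hb; simp
  | cons c cs ih =>
    intro b mb h0 hb
    by_cases hc : c = '('
    · have hA : pvAStep (b - mb, -mb) c = (b + 1 - mb, -mb) := by
        simp [pvAStep, hc, Prod.ext_iff]; split_ifs <;> omega
      have hB : pvBStep (b, mb) c = (b + 1, mb) := by
        simp [pvBStep, hc, Prod.ext_iff]; omega
      simp only [List.foldl_cons, hA, hB]
      exact ih (b + 1) mb h0 (by omega)
    · by_cases hlt : b - 1 < mb
      · have hA : pvAStep (b - mb, -mb) c = (0, -mb + 1) := by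
          simp [pvAStep, hc, Prod.ext_iff]; omega
        have hB : pvBStep (b, mb) c = (b - 1, b - 1) := by
          simp [pvBStep, hc, Prod.ext_iff]; omega
        simp only [List.foldl_cons, hA, hB]
        have := ih (b - 1) (b - 1) (by omega) (by omega)
        have he : (0 : Int) = (b - 1) - (b - 1) := by ring
        have he2 : -mb + 1 = -(b - 1) := by omega
        rw [he, he2]; exact this
      · have hA : pvAStep (b - mb, -mb) c = (b - 1 - mb, -mb) := by
          simp [pvAStep, hc, Prod.ext_iff]; split_ifs <;> omega
        have hB : pvBStep (b, mb) c = (b - 1, mb) := by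
          simp [pvBStep, hc, Prod.ext_iff]; omega
        simp only [List.foldl_cons, hA, hB]
        exact ih (b - 1) mb h0 (by omega)

-- Per-case agreement: A's inner loop count equals B's helper value.
theorem pv_case_eq (s : String) :
    (s.toList.foldl pvAStep (0, 0)).2 = pvMoves s := by
  unfold pvMoves
  rw [pvB_build]
  have hmin : PySem.List.min? (([0] : List Int) ++ pvPrefs 0 s.toList) (fun y => y)
      = some ((pvPrefs 0 s.toList).foldl min 0) := by
    simpa using PySem.List.min?_id_cons (0 : Int) (pvPrefs 0 s.toList)
  simp only [hmin, Option.getD_some]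
  rw [pvPrefs_min]
  have h := pv_loop_link s.toList 0 0 le_rfl le_rfl
  simp only [sub_zero, neg_zero] at h
  rw [h]

-- A's foldl-append outer loop equals map over B's helper.
theorem pv_outer (test_cases : List (Int × String)) : ∀ (acc : List Int),
    test_cases.foldl (fun results case =>
      let s := case.2
      let st := s.toList.foldl pvAStep (0, 0)
      results ++ [st.2]) acc
    = acc ++ test_cases.map (fun case => pvMoves case.2) := by
  induction test_cases with
  | nil => intro acc; simp
  | cons c cs ih =>
    intro acc
    simp only [List.foldl_cons, List.map_cons]
    rw [pv_case_eq c.2, ih]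
    simp

-- ===== VERDICT (by name: the statement is the Claim_ definition above) =====
theorem minimum_moves_to_rbs_spec : Claim_equal_minimum_moves_to_rbs := by
  intro t test_cases _
  unfold Spec_minimum_moves_to_rbs minimum_moves_to_rbs minimum_moves_to_rbs_alt
  simpa using pv_outer test_cases []
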